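-- pv_equiv track=rewrite | github.com/goksu-uzunturk/TS-Anomaly-Detection | src/utils.py | generate_labels_for_window
-- ===== SOURCE A (Python) =====
-- def generate_labels_for_window(window_start, window_end, anomaly_ranges):
--     label_window = []
--     for i in range(window_start, window_end + 1):
--         label = 0  # Default to 'normal'
--         for anomaly_type, ranges in anomaly_ranges.items():
--             for (range_start, range_end) in ranges:
--                 # Check if the point is within the anomaly range
--                 if range_start <= i <= range_end:
--                     label = anomaly_type  # Within anomaly range
--                     break  # Stop checking if label is set
--             if label != 0:  # Exit if labeled with anomaly
--                 break
--         label_window.append(label)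
--
--     return label_window
-- ===== SOURCE B (Python) =====
-- def generate_labels_for_window(window_start, window_end, anomaly_ranges):
--     n = window_end - window_start + 1
--     if n <= 0:
--         return []
--     labels = [0] * n
--     # Paint ranges onto the window buffer in reverse priority order, so the
--     # first anomaly type listed wins; type 0 means 'normal' and paints nothing.
--     for anomaly_type, ranges in reversed(list(anomaly_ranges.items())):
--         if anomaly_type == 0:
--             continue
--         for range_start, range_end in ranges:
--             lo = max(range_start, window_start)
--             hi = min(range_end, window_end)
--             for j in range(lo - window_start, hi - window_start + 1):
--                 labels[j] = anomaly_type
--     return labels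
-- ===== Notes on version B (the rewrite author's own statement) =====
-- stated objective: alternative
-- what changed: Instead of scanning every anomaly range for every window point, B allocates the window buffer once and paints each range's clipped interval onto it in reverse priority order (first listed type wins; type 0 paints nothing).
import Mathlib
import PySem

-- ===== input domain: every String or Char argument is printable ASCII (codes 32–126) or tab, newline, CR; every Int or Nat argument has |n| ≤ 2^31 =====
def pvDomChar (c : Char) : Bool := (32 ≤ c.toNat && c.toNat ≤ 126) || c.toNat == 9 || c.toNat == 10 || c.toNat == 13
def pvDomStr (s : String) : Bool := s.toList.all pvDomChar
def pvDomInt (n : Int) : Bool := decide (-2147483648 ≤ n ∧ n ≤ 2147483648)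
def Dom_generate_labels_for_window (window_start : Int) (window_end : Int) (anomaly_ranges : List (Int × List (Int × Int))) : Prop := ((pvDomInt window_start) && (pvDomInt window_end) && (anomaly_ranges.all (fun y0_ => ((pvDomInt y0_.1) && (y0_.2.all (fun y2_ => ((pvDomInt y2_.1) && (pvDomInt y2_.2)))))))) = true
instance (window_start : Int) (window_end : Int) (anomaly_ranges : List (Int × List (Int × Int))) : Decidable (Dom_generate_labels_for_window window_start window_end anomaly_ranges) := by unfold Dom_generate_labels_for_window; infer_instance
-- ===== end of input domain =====

-- B replaces A's per-point scan of all ranges by painting each range's clipped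
-- interval onto the window buffer, in reverse priority order (objective: alternative).

-- ===== PORT A =====
-- inner 'for (range_start, range_end) in ranges: … break' loop of A
def pvAInnerLoop (i t : Int) : List (Int × Int) → Int → Int
  | [], label => label
  | (rs, re) :: rest, label =>
      if rs ≤ i ∧ i ≤ re then t else pvAInnerLoop i t rest label

-- 'for anomaly_type, ranges in anomaly_ranges.items(): … if label != 0: break'
def pvAOuterLoop (i : Int) : List (Int × List (Int × Int)) → Int
  | [] => 0
  | (t, ranges) :: rest =>
      let label := pvAInnerLoop i t ranges 0
      if label ≠ 0 then label else pvAOuterLoop i rest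

def generate_labels_for_window (window_start : Int) (window_end : Int) (anomaly_ranges : List (Int × List (Int × Int))) : List Int :=
  (PySem.List.pyRange window_start (window_end + 1) 1).foldl
    (fun label_window i => label_window ++ [pvAOuterLoop i anomaly_ranges]) []

-- ===== PORT B =====
-- paint one clipped range onto the buffer (j ≥ 0 always holds, so j.toNat is exact)
def pvPaintRange (ws we t : Int) (labels : List Int) (r : Int × Int) : List Int :=
  let lo := max r.1 ws
  let hi := min r.2 we
  (PySem.List.pyRange (lo - ws) (hi - ws + 1) 1).foldl
    (fun ls j => ls.set j.toNat t) labels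

def generate_labels_for_window_alt (window_start : Int) (window_end : Int) (anomaly_ranges : List (Int × List (Int × Int))) : List Int :=
  let n := window_end - window_start + 1
  if n ≤ 0 then []
  else
    anomaly_ranges.reverse.foldl
      (fun ls p =>
        if p.1 = 0 then ls
        else p.2.foldl (pvPaintRange window_start window_end p.1) ls)
      (List.replicate n.toNat 0)

-- ===== PRECONDITION & SPEC =====
def Spec_generate_labels_for_window (window_start : Int) (window_end : Int) (anomaly_ranges : List (Int × List (Int × Int))) (out : List Int) : Prop := out = generate_labels_for_window_alt window_start window_end anomaly_ranges
instance (window_start : Int) (window_end : Int) (anomaly_ranges : List (Int × List (Int × Int))) (out : List Int) : Decidable (Spec_generate_labels_for_window window_start window_end anomaly_ranges out) := by unfold Spec_generate_labels_for_window; infer_instance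

-- ===== CLAIM (what is proved, stated in full; the proofs are below) =====
def Claim_equal_generate_labels_for_window : Prop := ∀ (window_start : Int) (window_end : Int) (anomaly_ranges : List (Int × List (Int × Int))), Dom_generate_labels_for_window window_start window_end anomaly_ranges → Spec_generate_labels_for_window window_start window_end anomaly_ranges (generate_labels_for_window window_start window_end anomaly_ranges)

-- ===== LEMMAS AND PROOFS =====

-- A as a map over the window points
theorem foldl_append_singleton {α β : Type} (f : α → β) :
    ∀ (xs : List α) (acc : List β),
      xs.foldl (fun acc i => acc ++ [f i]) acc = acc ++ xs.map f
  | [], acc => by simp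
  | x :: xs, acc => by
      simp [List.foldl, foldl_append_singleton f xs]

theorem gen_a_eq_map (ws we : Int) (ar : List (Int × List (Int × Int))) :
    generate_labels_for_window ws we ar =
      (PySem.List.pyRange ws (we + 1) 1).map (fun i => pvAOuterLoop i ar) := by
  unfold generate_labels_for_window
  rw [foldl_append_singleton]
  simp

-- pvAInnerLoop characterised by range membership
theorem pvAInnerLoop_eq_any (i t : Int) :
    ∀ (rs : List (Int × Int)),
      pvAInnerLoop i t rs 0 =
        if ∃ r ∈ rs, r.1 ≤ i ∧ i ≤ r.2 then t else 0
  | [] => by simp [pvAInnerLoop]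
  | (a, b) :: rest => by
      by_cases h : a ≤ i ∧ i ≤ b
      · simp [pvAInnerLoop, h]
      · have hiff : (∃ r ∈ ((a, b) :: rest), r.1 ≤ i ∧ i ≤ r.2) ↔
            (∃ r ∈ rest, r.1 ≤ i ∧ i ≤ r.2) := by
          constructor
          · rintro ⟨r, hr, hc⟩
            rcases List.mem_cons.mp hr with h' | h'
            · subst h'; exact absurd hc h
            · exact ⟨r, h', hc⟩
          · rintro ⟨r, hr, hc⟩
            exact ⟨r, List.mem_cons_of_mem _ hr, hc⟩
        simp only [pvAInnerLoop, h, if_false, pvAInnerLoop_eq_any i t rest, hiff]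

-- the set-fold over a pyRange, pointwise
theorem length_foldl_set (t : Int) :
    ∀ (js : List Int) (ls : List Int),
      (js.foldl (fun ls j => ls.set j.toNat t) ls).length = ls.length
  | [], ls => rfl
  | j :: js, ls => by
      simp [List.foldl, length_foldl_set t js]

theorem foldl_set_getElem? (t : Int) :
    ∀ (m : Nat) (a b : Int) (ls : List Int), (b - a).toNat = m → 0 ≤ a →
      b ≤ (ls.length : Int) → ∀ (k : Nat),
      ((PySem.List.pyRange a b 1).foldl (fun ls j => ls.set j.toNat t) ls)[k]? =
        if a ≤ (k : Int) ∧ (k : Int) < b then some t else ls[k]?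
  | 0, a, b, ls, hm, ha, hb, k => by
      have hba : b ≤ a := by omega
      rw [PySem.List.pyRange_one_eq_nil hba]
      have : ¬ (a ≤ (k : Int) ∧ (k : Int) < b) := by omega
      simp [this]
  | m + 1, a, b, ls, hm, ha, hb, k => by
      have hab : a < b := by omega
      rw [PySem.List.pyRange_one_cons hab]
      simp only [List.foldl]
      have hlen : ((ls.set a.toNat t).length : Int) = (ls.length : Int) := by simp
      have hrec := foldl_set_getElem? t m (a + 1) b (ls.set a.toNat t)
        (by omega) (by omega) (by omega) k
      rw [hrec]
      by_cases h1 : a + 1 ≤ (k : Int) ∧ (k : Int) < b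
      · simp [h1, show a ≤ (k : Int) ∧ (k : Int) < b by omega]
      · by_cases h2 : (k : Int) = a
        · have hk : k = a.toNat := by omega
          have hlt : a.toNat < ls.length := by omega
          rw [if_neg h1, if_pos (show a ≤ (k : Int) ∧ (k : Int) < b by omega), hk]
          simp [hlt]
        · have hne : a.toNat ≠ k := by omega
          have hout : ¬ (a ≤ (k : Int) ∧ (k : Int) < b) := by omega
          rw [if_neg h1, if_neg hout]
          exact List.getElem?_set_ne hne

-- painting one range, pointwise (buffer has length (we-ws+1).toNat)
theorem pvPaintRange_length (ws we t : Int) (ls : List Int) (r : Int × Int) :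
    (pvPaintRange ws we t ls r).length = ls.length := by
  unfold pvPaintRange
  exact length_foldl_set t _ ls

theorem pvPaintRange_getElem? (ws we t : Int) (ls : List Int) (r : Int × Int)
    (hlen : (ls.length : Int) = we - ws + 1) (k : Nat) (hk : k < ls.length) :
    (pvPaintRange ws we t ls r)[k]? =
      if r.1 ≤ ws + (k : Int) ∧ ws + (k : Int) ≤ r.2 then some t else ls[k]? := by
  unfold pvPaintRange
  rw [foldl_set_getElem? t (min r.2 we - ws + 1 - (max r.1 ws - ws)).toNat
    (max r.1 ws - ws) (min r.2 we - ws + 1) ls rfl (by omega) (by omega) k]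
  congr 1
  simp only [eq_iff_iff]
  omega

-- painting all ranges of one type, pointwise
theorem foldl_paint_length (ws we t : Int) :
    ∀ (rs : List (Int × Int)) (ls : List Int),
      (rs.foldl (pvPaintRange ws we t) ls).length = ls.length
  | [], ls => rfl
  | r :: rs, ls => by
      simp [List.foldl, foldl_paint_length ws we t rs, pvPaintRange_length]

theorem foldl_paint_getElem? (ws we t : Int) :
    ∀ (rs : List (Int × Int)) (ls : List Int),
      (ls.length : Int) = we - ws + 1 → ∀ (k : Nat), k < ls.length →
      (rs.foldl (pvPaintRange ws we t) ls)[k]? =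
        if ∃ r ∈ rs, r.1 ≤ ws + (k : Int) ∧ ws + (k : Int) ≤ r.2
        then some t else ls[k]?
  | [], ls, hlen, k, hk => by simp
  | r :: rs, ls, hlen, k, hk => by
      simp only [List.foldl]
      rw [foldl_paint_getElem? ws we t rs (pvPaintRange ws we t ls r)
        (by rw [pvPaintRange_length]; exact hlen)
        k (by rw [pvPaintRange_length]; exact hk)]
      rw [pvPaintRange_getElem? ws we t ls r hlen k hk]
      by_cases h1 : ∃ r' ∈ rs, r'.1 ≤ ws + (k : Int) ∧ ws + (k : Int) ≤ r'.2
      · simp [h1]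
      · by_cases h2 : r.1 ≤ ws + (k : Int) ∧ ws + (k : Int) ≤ r.2
        · simp [h1, h2]
        · simp [h1, h2]

-- the reverse fold of B, pointwise: it computes pvAOuterLoop at each point
def pvBFold (ws we : Int) (ar : List (Int × List (Int × Int))) : List Int :=
  ar.reverse.foldl
    (fun ls p => if p.1 = 0 then ls
      else p.2.foldl (pvPaintRange ws we p.1) ls)
    (List.replicate (we - ws + 1).toNat 0)

theorem pvBFold_cons (ws we : Int) (p : Int × List (Int × Int))
    (ar : List (Int × List (Int × Int))) :
    pvBFold ws we (p :: ar) =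
      if p.1 = 0 then pvBFold ws we ar
      else p.2.foldl (pvPaintRange ws we p.1) (pvBFold ws we ar) := by
  unfold pvBFold
  rw [List.reverse_cons, List.foldl_append]
  simp

theorem pvBFold_length (ws we : Int) :
    ∀ (ar : List (Int × List (Int × Int))),
      (pvBFold ws we ar).length = (we - ws + 1).toNat
  | [] => by simp [pvBFold]
  | p :: ar => by
      rw [pvBFold_cons]
      by_cases h : p.1 = 0
      · simp [h, pvBFold_length ws we ar]
      · simp [h, foldl_paint_length, pvBFold_length ws we ar]

theorem pvBFold_getElem? (ws we : Int) (hn : ¬ we - ws + 1 ≤ 0) :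
    ∀ (ar : List (Int × List (Int × Int))) (k : Nat), (k : Int) < we - ws + 1 →
      (pvBFold ws we ar)[k]? = some (pvAOuterLoop (ws + (k : Int)) ar)
  | [], k, hk => by
      have : k < (we - ws + 1).toNat := by omega
      simp [pvBFold, pvAOuterLoop, this]
  | p :: ar, k, hk => by
      have hlen : ((pvBFold ws we ar).length : Int) = we - ws + 1 := by
        rw [pvBFold_length]; omega
      have hklen : k < (pvBFold ws we ar).length := by
        rw [pvBFold_length]; omega
      rw [pvBFold_cons]
      by_cases h0 : p.1 = 0
      · have : pvAOuterLoop (ws + (k : Int)) (p :: ar) =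
            pvAOuterLoop (ws + (k : Int)) ar := by
          obtain ⟨t, rs⟩ := p
          simp only at h0
          simp [pvAOuterLoop, h0, pvAInnerLoop_eq_any]
        rw [this, if_pos h0]
        exact pvBFold_getElem? ws we hn ar k hk
      · rw [if_neg h0,
          foldl_paint_getElem? ws we p.1 p.2 (pvBFold ws we ar) hlen k hklen,
          pvBFold_getElem? ws we hn ar k hk]
        obtain ⟨t, rs⟩ := p
        simp only at h0 ⊢
        simp only [pvAOuterLoop, pvAInnerLoop_eq_any]
        by_cases hA : ∃ r ∈ rs, r.1 ≤ ws + (k : Int) ∧ ws + (k : Int) ≤ r.2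
        · simp [hA, h0]
        · simp [hA]

-- ===== VERDICT (by name: the statement is the Claim_ definition above) =====
theorem generate_labels_for_window_spec : Claim_equal_generate_labels_for_window := by
  intro ws we ar _
  show generate_labels_for_window ws we ar = generate_labels_for_window_alt ws we ar
  rw [gen_a_eq_map]
  by_cases hn : we - ws + 1 ≤ 0
  · have h1 : generate_labels_for_window_alt ws we ar = [] := by
      unfold generate_labels_for_window_alt; simp [hn]
    rw [h1, PySem.List.pyRange_one_eq_nil (by omega)]; simp
  · have halt : generate_labels_for_window_alt ws we ar = pvBFold ws we ar := by
      unfold generate_labels_for_window_alt pvBFold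
      simp only [if_neg hn]
    rw [halt]
    apply List.ext_getElem?
    intro k
    by_cases hk : (k : Int) < we - ws + 1
    · have hkl : k < (PySem.List.pyRange ws (we + 1) 1).length := by
        rw [PySem.List.length_pyRange_one]; omega
      rw [pvBFold_getElem? ws we hn ar k hk, List.getElem?_map,
        List.getElem?_eq_getElem hkl, PySem.List.getElem_pyRange_one]
      rfl
    · have h1 : (pvBFold ws we ar)[k]? = none := by
        rw [List.getElem?_eq_none_iff, pvBFold_length]; omega
      have h2 : ((PySem.List.pyRange ws (we + 1) 1).map (fun i => pvAOuterLoop i ar))[k]? = none := by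
        rw [List.getElem?_eq_none_iff]
        rw [List.length_map, PySem.List.length_pyRange_one]; omega
      rw [h1, h2]
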